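-- pv_equiv track=rewrite | github.com/pypi-data/pypi-mirror-379 | packages/edawishlist/edawishlist-0.0.24-py3-none-any.whl/edawishlist/memory.py | get_register_bits_lists
-- ===== SOURCE A (Python) =====
-- def get_register_bits_lists(address_list, address_bits_lists, width):
--     register_current_bit = width - 1
--     register_bits_lists = []
--     # Iterating through the list of addresses and list of list of address_bits
--     for address, address_bits in zip(address_list, address_bits_lists):
--         register_bits = []
--         # assigning name of the owner for each bit
--         for bit in address_bits:
--             # keep tracking of the register bit
--             register_bits.append(register_current_bit)
--             # decrementing current bit
--             register_current_bit -= 1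
--         # keep track of the list of register_bits
--         register_bits_lists.append(register_bits)
--     return register_bits_lists
-- ===== SOURCE B (Python) =====
-- def get_register_bits_lists(address_list, address_bits_lists, width):
--     lengths = [len(address_bits) for _, address_bits in zip(address_list, address_bits_lists)]
--     total = sum(lengths)
--     flat = list(range(width - 1, width - 1 - total, -1))
--     register_bits_lists = []
--     i = 0
--     for n in lengths:
--         register_bits_lists.append(flat[i:i + n])
--         i += n
--     return register_bits_lists
-- ===== Notes on version B (the rewrite author's own statement) =====
-- stated objective: alternative
-- what changed: Replaces A's single decrementing counter with an inner append loop by building the whole descending index sequence once with range() and then chunking it by slicing at a running offset.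
import Mathlib
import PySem

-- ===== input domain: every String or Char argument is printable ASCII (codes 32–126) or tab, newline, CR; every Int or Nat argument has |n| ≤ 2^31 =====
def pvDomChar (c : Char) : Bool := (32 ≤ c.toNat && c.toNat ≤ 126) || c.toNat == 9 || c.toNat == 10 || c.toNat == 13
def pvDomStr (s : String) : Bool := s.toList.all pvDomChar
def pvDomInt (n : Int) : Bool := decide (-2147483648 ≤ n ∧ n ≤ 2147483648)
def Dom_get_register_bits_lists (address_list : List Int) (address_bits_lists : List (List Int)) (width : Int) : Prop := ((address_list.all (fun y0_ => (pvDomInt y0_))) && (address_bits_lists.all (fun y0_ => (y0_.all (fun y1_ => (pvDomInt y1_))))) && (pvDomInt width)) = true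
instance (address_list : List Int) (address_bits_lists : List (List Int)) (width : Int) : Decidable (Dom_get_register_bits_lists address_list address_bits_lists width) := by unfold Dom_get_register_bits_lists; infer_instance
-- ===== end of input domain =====

-- B builds the whole descending index sequence once (range) and chunks it by slicing
-- at a running offset, instead of A's decrementing counter with an inner append loop.

-- ===== PORT A =====
def get_register_bits_lists (address_list : List Int) (address_bits_lists : List (List Int)) (width : Int) : List (List Int) :=
  ((List.zip address_list address_bits_lists).foldl
    (fun (st : Int × List (List Int)) p =>
      let inner := p.2.foldl (fun (s : Int × List Int) _bit => (s.1 - 1, s.2 ++ [s.1])) (st.1, ([] : List Int))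
      (inner.1, st.2 ++ [inner.2]))
    (width - 1, ([] : List (List Int)))).2

-- ===== PORT B =====
def get_register_bits_lists_alt (address_list : List Int) (address_bits_lists : List (List Int)) (width : Int) : List (List Int) :=
  let lengths := (List.zip address_list address_bits_lists).map (fun p => (p.2.length : Int))
  let total := lengths.sum
  let flat := PySem.List.pyRange (width - 1) (width - 1 - total) (-1)
  (lengths.foldl
    (fun (st : Int × List (List Int)) n =>
      (st.1 + n, st.2 ++ [PySem.List.slice flat (some st.1) (some (st.1 + n))]))
    (0, ([] : List (List Int)))).2

-- ===== PRECONDITION & SPEC =====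
def Spec_get_register_bits_lists (address_list : List Int) (address_bits_lists : List (List Int)) (width : Int) (out : List (List Int)) : Prop := out = get_register_bits_lists_alt address_list address_bits_lists width
instance (address_list : List Int) (address_bits_lists : List (List Int)) (width : Int) (out : List (List Int)) : Decidable (Spec_get_register_bits_lists address_list address_bits_lists width out) := by unfold Spec_get_register_bits_lists; infer_instance

-- ===== CLAIM (what is proved, stated in full; the proofs are below) =====
def Claim_equal_get_register_bits_lists : Prop := ∀ (address_list : List Int) (address_bits_lists : List (List Int)) (width : Int), Dom_get_register_bits_lists address_list address_bits_lists width → Spec_get_register_bits_lists address_list address_bits_lists width (get_register_bits_lists address_list address_bits_lists width)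

-- ===== LEMMAS AND PROOFS =====

-- descending run of n indices starting at c: [c, c-1, ..., c-n+1]
def pvDesc (c : Int) (n : Nat) : List Int := (List.range n).map (fun k => c - Int.ofNat k)

-- common characterisation of both results, driven by the group lengths
def pvSpecL (c : Int) : List Nat → List (List Int)
  | [] => []
  | n :: rest => pvDesc c n :: pvSpecL (c - n) rest

theorem pvDesc_succ (c : Int) (n : Nat) : pvDesc c (n + 1) = c :: pvDesc (c - 1) n := by
  unfold pvDesc
  rw [List.range_succ_eq_map]
  simp only [List.map_cons, List.map_map]
  congr 1
  · simp
  · refine List.map_congr_left (fun k _ => ?_)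
    simp only [Function.comp_apply, Int.ofNat_eq_natCast, Nat.succ_eq_add_one]
    push_cast
    ring

theorem pvA_inner (bs : List Int) : ∀ (c : Int) (acc : List Int),
    bs.foldl (fun (s : Int × List Int) _bit => (s.1 - 1, s.2 ++ [s.1])) (c, acc)
      = (c - bs.length, acc ++ pvDesc c bs.length) := by
  induction bs with
  | nil => intro c acc; simp [pvDesc]
  | cons b bs ih =>
    intro c acc
    rw [List.foldl_cons, ih, List.length_cons, pvDesc_succ]
    rw [Prod.mk.injEq]
    constructor
    · push_cast; ring
    · simp

theorem pvA_outer (pairs : List (Int × List Int)) : ∀ (c : Int) (acc : List (List Int)),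
    (pairs.foldl
      (fun (st : Int × List (List Int)) p =>
        let inner := p.2.foldl (fun (s : Int × List Int) _bit => (s.1 - 1, s.2 ++ [s.1])) (st.1, ([] : List Int))
        (inner.1, st.2 ++ [inner.2]))
      (c, acc)).2 = acc ++ pvSpecL c (pairs.map (fun p => p.2.length)) := by
  induction pairs with
  | nil => intro c acc; simp [pvSpecL]
  | cons p ps ih =>
    intro c acc
    rw [List.foldl_cons]
    dsimp only
    rw [pvA_inner, List.nil_append]
    rw [ih, List.map_cons]
    simp [pvSpecL]

theorem pvDesc_slice (c : Int) (m i n : Nat) (h : i + n ≤ m) :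
    PySem.List.slice (pvDesc c m) (some (i : Int)) (some ((i : Int) + (n : Int)))
      = pvDesc (c - i) n := by
  rw [PySem.List.slice_natCast_add]
  apply List.ext_getElem
  · simp [pvDesc]; omega
  · intro j h1 h2
    simp only [pvDesc, List.getElem_take, List.getElem_drop, List.getElem_map,
      List.getElem_range, Int.ofNat_eq_natCast]
    push_cast
    ring

theorem pvB_outer (c0 : Int) (T : Nat) (ns : List Nat) : ∀ (i : Nat) (acc : List (List Int)),
    i + ns.sum ≤ T →
    ((ns.map (Nat.cast : Nat → Int)).foldl
      (fun (st : Int × List (List Int)) n =>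
        (st.1 + n, st.2 ++ [PySem.List.slice (pvDesc c0 T) (some st.1) (some (st.1 + n))]))
      ((i : Int), acc)).2 = acc ++ pvSpecL (c0 - i) ns := by
  induction ns with
  | nil => intro i acc _; simp [pvSpecL]
  | cons n ns ih =>
    intro i acc h
    rw [List.map_cons, List.foldl_cons]
    dsimp only
    rw [pvDesc_slice c0 T i n (by simp only [List.sum_cons] at h; omega)]
    have hcast : ((i : Int) + (n : Int)) = ((i + n : Nat) : Int) := by push_cast; ring
    rw [hcast, ih (i + n) (acc ++ [pvDesc (c0 - i) n]) (by simp only [List.sum_cons] at h; omega)]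
    rw [List.append_assoc, List.singleton_append]
    show _ = acc ++ (pvDesc (c0 - ↑i) n :: pvSpecL (c0 - ↑i - ↑n) ns)
    congr 2
    push_cast
    ring_nf

-- ===== VERDICT (by name: the statement is the Claim_ definition above) =====
theorem get_register_bits_lists_spec : Claim_equal_get_register_bits_lists := by
  intro al abl w _
  unfold Spec_get_register_bits_lists get_register_bits_lists get_register_bits_lists_alt
  dsimp only
  set pairs := List.zip al abl with hp
  set ns := pairs.map (fun p => p.2.length) with hns
  have hlen : pairs.map (fun p => ((p.2.length : Nat) : Int)) = ns.map (Nat.cast : Nat → Int) := by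
    rw [hns, List.map_map]
    rfl
  have hsum : (ns.map (Nat.cast : Nat → Int)).sum = ((ns.sum : Nat) : Int) :=
    (Nat.cast_list_sum ns).symm
  have htn : (w - 1 - (w - 1 - ((ns.sum : Nat) : Int))).toNat = ns.sum := by omega
  have hflat : PySem.List.pyRange (w - 1) (w - 1 - (pairs.map (fun p => ((p.2.length : Nat) : Int))).sum) (-1)
      = pvDesc (w - 1) ns.sum := by
    rw [hlen, hsum, PySem.List.pyRange_neg_one, htn]
    rfl
  rw [pvA_outer, hflat, hlen, List.nil_append]
  have h0 : ((0 : Nat) : Int) = (0 : Int) := by norm_num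
  rw [← h0, pvB_outer (w - 1) ns.sum ns 0 [] (by omega), List.nil_append]
  rw [← hns]
  norm_num
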